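-- pv_equiv track=rewrite | github.com/shaze/amytree | bin/plotY.py | cvtNewick
-- ===== SOURCE A (Python) =====
-- def recCvt(node, children):
--     if node not in children:
--         return node
--     curr = []
--     for c in children[node]:
--         curr.append(recCvt(c,children))
--     if len(curr)==1: curr.append("_")
--     this_level = ",".join(curr)
--     return "(%s)%s"%(this_level,node)
--
-- def cvtNewick(parent):
--     children = {}
--     root = []
--     for k in parent.keys():
--         siblings = children.get(parent[k],False)
--         if siblings:
--             siblings.append(k)
--         else:
--             children[parent[k]]=[k]
--     newick = recCvt("Root",children)
--     return children, newick+";"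
-- ===== SOURCE B (Python) =====
-- def cvtNewick(parent):
--     children = {}
--     for k in parent.keys():
--         siblings = children.get(parent[k], False)
--         if siblings:
--             siblings.append(k)
--         else:
--             children[parent[k]] = [k]
--     # iterative rendering: emit the Newick text left-to-right as a token
--     # stream driven by an explicit stack (no recursion, no per-node joins)
--     out = []
--     stack = [("Root", True)]
--     while stack:
--         item, is_node = stack.pop()
--         if not is_node:
--             out.append(item)
--             continue
--         kids = children.get(item)
--         if kids is None:
--             out.append(item)
--         else:
--             stack.append((")" + item, False))
--             if len(kids) == 1:
--                 stack.append(("_", False))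
--                 stack.append((",", False))
--             for i in range(len(kids) - 1, -1, -1):
--                 stack.append((kids[i], True))
--                 if i > 0:
--                     stack.append((",", False))
--             stack.append(("(", False))
--     return children, "".join(out) + ";"
-- ===== Notes on version B (the rewrite author's own statement) =====
-- stated objective: alternative
-- what changed: The recursive recCvt is replaced by an iterative renderer: an explicit stack of (text, is_node) frames emits the Newick string left-to-right as a token stream (children pushed before the ')name' closer), so B does no recursion and no per-node ','.join of sub-strings; the children-grouping loop is kept identical.
import Mathlib
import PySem

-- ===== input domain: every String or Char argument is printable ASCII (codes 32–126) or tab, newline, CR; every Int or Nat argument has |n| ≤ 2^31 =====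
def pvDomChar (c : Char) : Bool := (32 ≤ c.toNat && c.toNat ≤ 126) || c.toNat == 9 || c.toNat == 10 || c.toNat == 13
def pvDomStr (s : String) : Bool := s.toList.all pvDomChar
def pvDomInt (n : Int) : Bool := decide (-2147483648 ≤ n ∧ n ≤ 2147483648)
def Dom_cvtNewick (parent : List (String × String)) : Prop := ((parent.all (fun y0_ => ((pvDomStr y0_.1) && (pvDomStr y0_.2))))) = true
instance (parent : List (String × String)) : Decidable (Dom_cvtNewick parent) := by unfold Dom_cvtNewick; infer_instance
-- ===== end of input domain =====

-- B replaces A's recursive recCvt by an iterative left-to-right token stream driven by an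
-- explicit stack (objective: alternative, no recursion); same return value, no mutation of the argument.

-- ===== PORT A =====
-- first loop of cvtNewick (identical in Source A and Source B): group the keys by their parent value.
-- 'siblings.append(k)' mutates the stored list in place, keeping the dict position:
-- ported as an overwriting insert of the extended list (Dict.insert keeps the position of an existing key).
def pvChildren (parent : List (String × String)) : PySem.Dict String (List String) :=
  (PySem.Dict.ofList parent).items.foldl
    (fun children kv =>
      match children.get? kv.2 with
      | some (s :: ss) => children.insert kv.2 ((s :: ss) ++ [kv.1])
      | _ => children.insert kv.2 [kv.1])
    PySem.Dict.empty

-- recCvt of Source A; the Nat is recursion fuel (an artifact of the port: Python recurses without bound,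
-- and parent.length + 2 levels always suffice on inputs satisfying Pre_cvtNewick).
def pvRecCvt (ch : PySem.Dict String (List String)) : Nat → String → String
  | 0, node => node
  | f + 1, node =>
    match ch.get? node with
    | none => node
    | some kids =>
      let curr := kids.map (fun c => pvRecCvt ch f c)
      let curr := if curr.length == 1 then curr ++ ["_"] else curr
      "(" ++ PySem.Str.join "," curr ++ ")" ++ node

def cvtNewick (parent : List (String × String)) : (List (String × List String)) × String :=
  let children := pvChildren parent
  let newick := pvRecCvt children (parent.length + 2) "Root"
  (children.items, newick ++ ";")

-- ===== PORT B =====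
-- the descending index loop of Source B that pushes kids[i] (and a "," literal before each non-first kid);
-- resulting stack top-first: kids[0], ",", kids[1], ",", …, kids[last], st.
def pvPushKids : List String → List (String × Bool) → List (String × Bool)
  | [], st => st
  | [c], st => (c, true) :: st
  | c :: c' :: rest, st => (c, true) :: (",", false) :: pvPushKids (c' :: rest) st

-- the while-loop of Source B; a frame (s, true) is a node to expand, (s, false) a literal token.
-- The Nat is loop fuel (an artifact of the port: Source B loops until the stack empties; pvFuel below
-- is a generous budget that is never exhausted on inputs satisfying Pre_cvtNewick).
def pvAltLoop (ch : PySem.Dict String (List String)) : Nat → List (String × Bool) → List String → List String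
  | 0, _, out => out
  | _ + 1, [], out => out
  | f + 1, (item, isNode) :: st, out =>
    if isNode = false then
      pvAltLoop ch f st (out ++ [item])
    else
      match ch.get? item with
      | none => pvAltLoop ch f st (out ++ [item])
      | some kids =>
        let st1 := (")" ++ item, false) :: st
        let st2 := if kids.length == 1 then (",", false) :: ("_", false) :: st1 else st1
        pvAltLoop ch f (("(", false) :: pvPushKids kids st2) out

def pvFuel (parent : List (String × String)) : Nat := 4 * (parent.length + 2) ^ (parent.length + 3)

def cvtNewick_alt (parent : List (String × String)) : (List (String × List String)) × String :=
  let children := pvChildren parent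
  let out := pvAltLoop children (pvFuel parent) [("Root", true)] []
  (children.items, PySem.Str.join "" out ++ ";")

-- ===== PRECONDITION & SPEC =====
-- m-fold iteration of the parent-pointer lookup (none once the chain leaves the keys).
def pvAnc (parent : List (String × String)) : Nat → String → Option String
  | 0, x => some x
  | m + 1, x =>
    match (PySem.Dict.ofList parent).get? x with
    | none => none
    | some y => pvAnc parent m y

-- Pre_ excludes exactly the parent maps on which "Root" lies on a parent-pointer cycle:
-- there A's recCvt recurses forever (Python raises RecursionError) and Source B's while-loop spins likewise.
def Pre_cvtNewick (parent : List (String × String)) : Prop :=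
  ∀ m, m < parent.length → pvAnc parent (m + 1) "Root" ≠ some "Root"

instance (parent : List (String × String)) : Decidable (Pre_cvtNewick parent) := by
  unfold Pre_cvtNewick; infer_instance

def pvWitness_cvtNewick : (List (String × String)) := [("A", "Root"), ("B", "A")]

def Spec_cvtNewick (parent : List (String × String)) (out : (List (String × List String)) × String) : Prop := out = cvtNewick_alt parent
instance (parent : List (String × String)) (out : (List (String × List String)) × String) : Decidable (Spec_cvtNewick parent out) := by unfold Spec_cvtNewick; infer_instance

-- ===== CLAIM (what is proved, stated in full; the proofs are below) =====
def Claim_equal_cvtNewick : Prop := ∀ (parent : List (String × String)), Dom_cvtNewick parent → Pre_cvtNewick parent → Spec_cvtNewick parent (cvtNewick parent)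

-- ===== LEMMAS AND PROOFS =====

-- proof-side descriptions of the recursion of pvRecCvt at fuel f:
-- okT: fuel f fully expands the subtree below a node (never hits the fuel-0 case on an internal node)
def pvOkT (ch : PySem.Dict String (List String)) : Nat → String → Bool
  | 0, n => (match ch.get? n with | none => true | some _ => false)
  | f + 1, n =>
    match ch.get? n with
    | none => true
    | some kids => kids.all (fun c => pvOkT ch f c)

-- the token lists of the kids of a node, separated by "," tokens
def pvSepJoin : List (List String) → List String
  | [] => []
  | [ts] => ts
  | ts :: ts' :: rest => ts ++ [","] ++ pvSepJoin (ts' :: rest)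

-- tokT: the token stream Source B's loop emits for a node (concatenates to pvRecCvt's string)
def pvTokT (ch : PySem.Dict String (List String)) : Nat → String → List String
  | 0, n => [n]
  | f + 1, n =>
    match ch.get? n with
    | none => [n]
    | some kids =>
      let mids := pvSepJoin (kids.map (fun c => pvTokT ch f c))
      let mids := if kids.length == 1 then mids ++ [",", "_"] else mids
      ["("] ++ mids ++ [")" ++ n]

-- stepsT: number of loop iterations Source B spends on a node
def pvStepsT (ch : PySem.Dict String (List String)) : Nat → String → Nat
  | 0, _ => 1
  | f + 1, n =>
    match ch.get? n with
    | none => 1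
    | some kids =>
      3 + (kids.map (fun c => pvStepsT ch f c)).sum + (kids.length - 1) +
        (if kids.length == 1 then 2 else 0)

lemma pvAltLoop_nil (ch : PySem.Dict String (List String)) (g : Nat) (out : List String) :
    pvAltLoop ch g [] out = out := by cases g <;> rfl

lemma pvAltLoop_lit (ch : PySem.Dict String (List String)) (f : Nat) (s : String)
    (st : List (String × Bool)) (out : List String) :
    pvAltLoop ch (f + 1) ((s, false) :: st) out = pvAltLoop ch f st (out ++ [s]) := by
  simp [pvAltLoop]

-- ---- facts about pvChildren ----
-- the step function of the grouping loop, as used by both pythons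
lemma pvChildStep_inv (pd : PySem.Dict String String) :
    ∀ (l : List (String × String)) (d : PySem.Dict String (List String)),
      (∀ kv ∈ l, pd.get? kv.1 = some kv.2) →
      (∀ n kids c, d.get? n = some kids → c ∈ kids → pd.get? c = some n) →
      ∀ n kids c, (l.foldl (fun children kv =>
          match children.get? kv.2 with
          | some (s :: ss) => children.insert kv.2 ((s :: ss) ++ [kv.1])
          | _ => children.insert kv.2 [kv.1]) d).get? n = some kids → c ∈ kids →
        pd.get? c = some n := by
  intro l
  induction l with
  | nil => intro d _ hd; simpa using hd
  | cons kv l ih =>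
    intro d hl hd
    simp only [List.foldl_cons]
    apply ih _ (fun kv' h => hl kv' (List.mem_cons_of_mem _ h))
    intro n kids c hget hc
    have hkv := hl kv (List.mem_cons_self ..)
    rcases hmatch : d.get? kv.2 with _ | ⟨_ | ⟨s, ss⟩⟩ <;> rw [hmatch] at hget <;>
      simp only [PySem.Dict.get?_insert] at hget <;> split_ifs at hget with hn <;>
      [skip; exact hd n kids c hget hc; skip; exact hd n kids c hget hc;
       skip; exact hd n kids c hget hc]
    · cases hget; subst hn
      rcases List.mem_singleton.mp hc with rfl; exact hkv
    · cases hget; subst hn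
      rcases List.mem_singleton.mp hc with rfl; exact hkv
    · cases hget; subst hn
      rcases List.mem_append.mp hc with hc2 | hc2
      · exact hd kv.2 (s :: ss) c hmatch hc2
      · rcases List.mem_singleton.mp hc2 with rfl; exact hkv

lemma pvChildren_child_parent {parent : List (String × String)} {n : String}
    {kids : List String} {c : String}
    (h : (pvChildren parent).get? n = some kids) (hc : c ∈ kids) :
    (PySem.Dict.ofList parent).get? c = some n := by
  refine pvChildStep_inv (PySem.Dict.ofList parent) _ PySem.Dict.empty ?_ ?_ n kids c h hc
  · intro kv hkv
    exact PySem.Dict.get?_of_mem_items _ (by cases kv; exact hkv) (PySem.Dict.nodup_keys_ofList parent)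
  · intro n kids c hget
    simp [PySem.Dict.get?_empty] at hget

lemma pvChildLen_inv :
    ∀ (l : List (String × String)) (d : PySem.Dict String (List String)) (c0 : Nat),
      (∀ n kids, d.get? n = some kids → kids.length ≤ c0) →
      ∀ n kids, (l.foldl (fun children kv =>
          match children.get? kv.2 with
          | some (s :: ss) => children.insert kv.2 ((s :: ss) ++ [kv.1])
          | _ => children.insert kv.2 [kv.1]) d).get? n = some kids →
        kids.length ≤ c0 + l.length := by
  intro l
  induction l with
  | nil => intro d c0 hd n kids h; simpa using hd n kids h
  | cons kv l ih =>
    intro d c0 hd n kids h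
    simp only [List.foldl_cons] at h
    have := ih _ (c0 + 1) ?_ n kids h
    · simpa [Nat.add_assoc, Nat.add_comm 1 l.length] using this
    intro n' kids' hget
    rcases hmatch : d.get? kv.2 with _ | ⟨_ | ⟨s, ss⟩⟩ <;> rw [hmatch] at hget <;>
      simp only [PySem.Dict.get?_insert] at hget <;> split_ifs at hget with hn
    · cases hget; simp
    · exact Nat.le_succ_of_le (hd _ _ hget)
    · cases hget; simp
    · exact Nat.le_succ_of_le (hd _ _ hget)
    · cases hget
      have := hd _ _ hmatch
      simpa using Nat.succ_le_succ this
    · exact Nat.le_succ_of_le (hd _ _ hget)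

lemma pvOfList_size_le (parent : List (String × String)) :
    (PySem.Dict.ofList parent).size ≤ parent.length := by
  have main : ∀ (l : List (String × String)) (d : PySem.Dict String String),
      (d.update l).size ≤ d.size + l.length := by
    intro l
    induction l with
    | nil => intro d; simp [PySem.Dict.update]
    | cons kv l ih =>
      intro d
      have h1 : (d.update (kv :: l)) = ((d.insert kv.1 kv.2).update l) := by
        simp [PySem.Dict.update]
      rw [h1]
      have h2 := ih (d.insert kv.1 kv.2)
      have h3 : (d.insert kv.1 kv.2).size ≤ d.size + 1 := by
        rw [PySem.Dict.size_insert]; split_ifs <;> omega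
      simp only [List.length_cons]; omega
  simpa [PySem.Dict.ofList, PySem.Dict.size_empty] using main parent PySem.Dict.empty

lemma pvChildren_kids_len {parent : List (String × String)} {n : String} {kids : List String}
    (h : (pvChildren parent).get? n = some kids) : kids.length ≤ parent.length := by
  have h1 := pvChildLen_inv (PySem.Dict.ofList parent).items PySem.Dict.empty 0
    (by intro n kids hget; simp [PySem.Dict.get?_empty] at hget) n kids h
  have h2 : (PySem.Dict.ofList parent).items.length = (PySem.Dict.ofList parent).size := rfl
  have h3 := pvOfList_size_le parent
  omega

-- ---- ancestor-chain facts ----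
lemma pvAnc_add (parent : List (String × String)) (a b : Nat) (x : String) :
    pvAnc parent (a + b) x = (pvAnc parent a x).bind (fun y => pvAnc parent b y) := by
  induction a generalizing x with
  | zero => simp [pvAnc]
  | succ a ih =>
    rw [Nat.succ_add]
    rw [pvAnc, pvAnc]
    cases (PySem.Dict.ofList parent).get? x with
    | none => simp
    | some y => simp [ih y]

lemma pvAnc_one (parent : List (String × String)) (x : String) :
    pvAnc parent 1 x = (PySem.Dict.ofList parent).get? x := by
  rw [pvAnc]
  cases (PySem.Dict.ofList parent).get? x <;> simp [pvAnc]

lemma pvChainLen {parent : List (String × String)} {n : String} {j : Nat} {r : String}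
    (hj : pvAnc parent j n = some r)
    (hinj : ∀ i i', i < j → i' < j → pvAnc parent i n = pvAnc parent i' n → i = i') :
    j ≤ (PySem.Dict.ofList parent).size := by
  have hsome : ∀ i, i < j → ∃ y, pvAnc parent i n = some y := by
    intro i hi
    have he : i + (j - i) = j := by omega
    rw [← he, pvAnc_add] at hj
    cases hy : pvAnc parent i n with
    | none => rw [hy] at hj; simp at hj
    | some y => exact ⟨y, rfl⟩
  have hkey : ∀ i, i < j → ((pvAnc parent i n).getD "") ∈ (PySem.Dict.ofList parent).keys := by
    intro i hi
    obtain ⟨y, hy⟩ := hsome i hi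
    have he : i + (j - i) = j := by omega
    have h1 : pvAnc parent (i + (j - i)) n = some r := by rw [he]; exact hj
    rw [pvAnc_add, hy] at h1
    simp only [Option.bind_some] at h1
    have h2 : (1 : Nat) + (j - i - 1) = j - i := by omega
    rw [← h2, pvAnc_add, pvAnc_one] at h1
    cases hg : (PySem.Dict.ofList parent).get? y with
    | none => rw [hg] at h1; simp at h1
    | some z =>
      have hy2 : y ∈ (PySem.Dict.ofList parent).keys := by
        by_contra hmem
        rw [(PySem.Dict.get?_eq_none_iff_not_mem_keys _ _).mpr hmem] at hg
        cases hg
      simpa [hy] using hy2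
  set l := (List.range j).map (fun i => (pvAnc parent i n).getD "") with hl
  have hnd : l.Nodup := by
    apply List.Nodup.map_on ?_ (List.nodup_range)
    intro a ha b hb hf
    obtain ⟨ya, hya⟩ := hsome a (List.mem_range.mp ha)
    obtain ⟨yb, hyb⟩ := hsome b (List.mem_range.mp hb)
    apply hinj a b (List.mem_range.mp ha) (List.mem_range.mp hb)
    rw [hya, hyb]
    rw [hya, hyb] at hf
    simpa using hf
  have hsub : l ⊆ (PySem.Dict.ofList parent).keys := by
    intro x hx
    rw [hl] at hx
    obtain ⟨i, hi, rfl⟩ := List.mem_map.mp hx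
    exact hkey i (List.mem_range.mp hi)
  have hlen : l.length = j := by simp [hl]
  have hkeysize : (PySem.Dict.ofList parent).keys.length = (PySem.Dict.ofList parent).size := by
    simp [PySem.Dict.keys, PySem.Dict.size]
  have : l.length ≤ (PySem.Dict.ofList parent).keys.length := by
    calc l.length = l.toFinset.card := (List.toFinset_card_of_nodup hnd).symm
    _ ≤ (PySem.Dict.ofList parent).keys.toFinset.card := Finset.card_le_card
        (by intro x hx; simp only [List.mem_toFinset] at *; exact hsub hx)
    _ ≤ _ := List.toFinset_card_le _
  omega

lemma pvNoRootCycle {parent : List (String × String)} (h : Pre_cvtNewick parent) :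
    ∀ m, 0 < m → pvAnc parent m "Root" ≠ some "Root" := by
  intro m
  induction m using Nat.strong_induction_on with
  | _ m ih =>
    intro h0 hm
    by_cases hlen : m ≤ parent.length
    · exact h (m - 1) (by omega) (by rw [show m - 1 + 1 = m by omega]; exact hm) 
    · have key : ∀ a b, a < b → b < m → pvAnc parent a "Root" = pvAnc parent b "Root" → False := by
        intro a b hab hbm heq2
        have h3 : pvAnc parent (b + (m - b)) "Root" = some "Root" := by
          rw [Nat.add_sub_cancel' (le_of_lt hbm)]; exact hm
        rw [pvAnc_add, ← heq2, ← pvAnc_add] at h3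
        exact ih (a + (m - b)) (by omega) (by omega) h3
      have hinj : ∀ i i', i < m → i' < m → pvAnc parent i "Root" = pvAnc parent i' "Root" → i = i' := by
        intro i i' hi hi' heq
        rcases Nat.lt_trichotomy i i' with h1 | h1 | h1
        · exact absurd (key i i' h1 hi' heq) (by simp)
        · exact h1
        · exact absurd (key i' i h1 hi heq.symm) (by simp)
      have := pvChainLen hm hinj
      have := pvOfList_size_le parent
      omega

lemma pvBoundJ {parent : List (String × String)} (h : Pre_cvtNewick parent) {j : Nat} {n : String}
    (hj : pvAnc parent j n = some "Root") : j ≤ (PySem.Dict.ofList parent).size := by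
  apply pvChainLen hj
  have key : ∀ a b, a < b → b < j → pvAnc parent a n = pvAnc parent b n → False := by
    intro a b hab hbj heq
    have h3 : pvAnc parent (b + (j - b)) n = some "Root" := by
      rw [Nat.add_sub_cancel' (le_of_lt hbj)]; exact hj
    rw [pvAnc_add, ← heq, ← pvAnc_add] at h3
    set j1 := a + (j - b) with hj1
    have hj1lt : j1 < j := by omega
    have h4 : pvAnc parent (j1 + (j - j1)) n = some "Root" := by
      rw [Nat.add_sub_cancel' (le_of_lt hj1lt)]; exact hj
    rw [pvAnc_add, h3] at h4
    simp only [Option.bind_some] at h4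
    exact pvNoRootCycle h (j - j1) (by omega) h4
  intro i i' hi hi' heq
  rcases Nat.lt_trichotomy i i' with h1 | h1 | h1
  · exact absurd (key i i' h1 hi' heq) (by simp)
  · exact h1
  · exact absurd (key i' i h1 hi heq.symm) (by simp)

lemma pvMainTerm {parent : List (String × String)} (h : Pre_cvtNewick parent) :
    ∀ f j n, pvAnc parent j n = some "Root" →
      (PySem.Dict.ofList parent).size + 1 ≤ f + j → pvOkT (pvChildren parent) f n = true := by
  intro f
  induction f with
  | zero =>
    intro j n hj hle
    exact absurd (pvBoundJ h hj) (by omega)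
  | succ f ih =>
    intro j n hj hle
    cases hg : (pvChildren parent).get? n with
    | none => simp [pvOkT, hg]
    | some kids =>
      simp only [pvOkT, hg, List.all_eq_true]
      intro c hc
      have hcp := pvChildren_child_parent hg hc
      have hanc : pvAnc parent (j + 1) c = some "Root" := by
        rw [show j + 1 = 1 + j by omega, pvAnc_add, pvAnc_one, hcp]
        simpa using hj
      exact ih (j + 1) c hanc (by omega)

-- ---- the stack machine computes the token stream ----
lemma pvAltLoop_node_none {ch : PySem.Dict String (List String)} {n : String}
    (hg : ch.get? n = none) (m : Nat) (st : List (String × Bool)) (out : List String) :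
    pvAltLoop ch (m + 1) ((n, true) :: st) out = pvAltLoop ch m st (out ++ [n]) := by
  simp [pvAltLoop, hg]

lemma pvAltLoop_node_some {ch : PySem.Dict String (List String)} {n : String} {kids : List String}
    (hg : ch.get? n = some kids) (m : Nat) (st : List (String × Bool)) (out : List String) :
    pvAltLoop ch (m + 1) ((n, true) :: st) out =
      pvAltLoop ch m (("(", false) :: pvPushKids kids
        (if kids.length == 1
          then (",", false) :: ("_", false) :: (")" ++ n, false) :: st
          else (")" ++ n, false) :: st)) out := by
  simp only [pvAltLoop, hg]
  simp

lemma pvSim (ch : PySem.Dict String (List String)) :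
    ∀ f n, pvOkT ch f n = true → ∀ st out g,
      pvAltLoop ch (pvStepsT ch f n + g) ((n, true) :: st) out
        = pvAltLoop ch g st (out ++ pvTokT ch f n) := by
  intro f
  induction f with
  | zero =>
    intro n hok st out g
    have hg : ch.get? n = none := by
      rcases hgg : ch.get? n with _ | kids
      · rfl
      · rw [pvOkT, hgg] at hok; cases hok
    rw [show pvStepsT ch 0 n + g = g + 1 from by simp only [pvStepsT]; omega,
        pvAltLoop_node_none hg, pvTokT]
  | succ f ih =>
    intro n hok st out g
    rcases hg : ch.get? n with _ | kids
    · rw [show pvStepsT ch (f + 1) n + g = g + 1 from by simp only [pvStepsT, hg]; omega,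
          pvAltLoop_node_none hg]
      rw [pvTokT, hg]
    · have hkids : ∀ c ∈ kids, pvOkT ch f c = true := by
        rw [pvOkT, hg] at hok; simpa [List.all_eq_true] using hok
      have hlist : ∀ (ks : List String), (∀ c ∈ ks, pvOkT ch f c = true) →
          ∀ (st : List (String × Bool)) (out : List String) (g : Nat),
            pvAltLoop ch ((ks.map (fun c => pvStepsT ch f c)).sum + (ks.length - 1) + g)
                (pvPushKids ks st) out
              = pvAltLoop ch g st (out ++ pvSepJoin (ks.map (fun c => pvTokT ch f c))) := by
        intro ks
        induction ks with
        | nil => intro _ st out g; simp [pvPushKids, pvSepJoin]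
        | cons c ks ihk =>
          intro hall st out g
          cases ks with
          | nil =>
            simp only [pvPushKids, List.map_cons, List.map_nil, List.sum_cons, List.sum_nil,
              List.length_cons, List.length_nil, pvSepJoin]
            have := ih c (hall c (List.mem_cons_self ..)) st out g
            simpa using this
          | cons c' ks' =>
            simp only [pvPushKids, List.map_cons, List.sum_cons, List.length_cons]
            rw [show pvStepsT ch f c + (pvStepsT ch f c' + (ks'.map (fun c => pvStepsT ch f c)).sum)
                  + (ks'.length + 1 + 1 - 1) + g
                = pvStepsT ch f c + (((pvStepsT ch f c' + (ks'.map (fun c => pvStepsT ch f c)).sum)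
                  + (ks'.length + 1 - 1) + g) + 1) from by omega]
            rw [ih c (hall c (List.mem_cons_self ..))]
            rw [pvAltLoop_lit]
            have hrest := ihk (fun c hc => hall c (List.mem_cons_of_mem _ hc)) st
              (out ++ pvTokT ch f c ++ [","]) g
            simp only [List.map_cons, List.sum_cons, List.length_cons] at hrest
            rw [hrest]
            simp [pvSepJoin]
      rw [show pvStepsT ch (f + 1) n + g
            = (1 + ((kids.map (fun c => pvStepsT ch f c)).sum + (kids.length - 1)
                + ((if kids.length == 1 then 2 else 0) + (1 + g))) + 1) from by
          simp only [pvStepsT, hg]; omega]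
      rw [pvAltLoop_node_some hg]
      rw [show 1 + ((kids.map (fun c => pvStepsT ch f c)).sum + (kids.length - 1)
            + ((if kids.length == 1 then 2 else 0) + (1 + g)))
          = ((kids.map (fun c => pvStepsT ch f c)).sum + (kids.length - 1)
            + ((if kids.length == 1 then 2 else 0) + (1 + g))) + 1 from by omega]
      rw [pvAltLoop_lit]
      by_cases hpad : kids.length = 1
      · have hbe : (kids.length == 1) = true := by simpa using hpad
        simp only [hbe, if_true]
        rw [hlist kids hkids _ _ (2 + (1 + g))]
        rw [show 2 + (1 + g) = (2 + g) + 1 from by omega, pvAltLoop_lit,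
            show 2 + g = (1 + g) + 1 from by omega, pvAltLoop_lit,
            show 1 + g = g + 1 from by omega, pvAltLoop_lit]
        rw [pvTokT, hg]
        simp only [hbe, if_true]
        simp
      · have hbe : (kids.length == 1) = false := by simpa using hpad
        simp only [hbe, Bool.false_eq_true, if_false]
        rw [show (0 + (1 + g)) = 1 + g from by omega]
        rw [hlist kids hkids _ _ (1 + g)]
        rw [show 1 + g = g + 1 from by omega, pvAltLoop_lit]
        rw [pvTokT, hg]
        simp only [hbe, Bool.false_eq_true, if_false]
        simp

lemma pvStepsBound (ch : PySem.Dict String (List String)) (L : Nat)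
    (hL : ∀ n kids, ch.get? n = some kids → kids.length ≤ L) :
    ∀ f n, pvStepsT ch f n ≤ 4 * (L + 2) ^ (f + 1) := by
  intro f
  induction f with
  | zero =>
    intro n
    have h1 : pvStepsT ch 0 n = 1 := by simp only [pvStepsT]
    have h2 : (L + 2) ^ (0 + 1) = L + 2 := by ring
    omega
  | succ f ih =>
    intro n
    have hpow : (L + 2) ^ (f + 1 + 1) = (L + 2) ^ (f + 1) * (L + 2) := by ring
    have hP1 : L + 2 ≤ (L + 2) ^ (f + 1) := Nat.le_self_pow (by omega) _
    rcases hg : ch.get? n with _ | kids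
    · have h1 : pvStepsT ch (f + 1) n = 1 := by simp only [pvStepsT, hg]
      have h2 : 1 ≤ (L + 2) ^ (f + 1) := by omega
      have h3 : (L + 2) ^ (f + 1) ≤ (L + 2) ^ (f + 1) * (L + 2) := Nat.le_mul_of_pos_right _ (by omega)
      omega
    · have h1 : pvStepsT ch (f + 1) n
          = 3 + (kids.map (fun c => pvStepsT ch f c)).sum + (kids.length - 1)
            + (if kids.length == 1 then 2 else 0) := by simp only [pvStepsT, hg]
      have hk : kids.length ≤ L := hL n kids hg
      have hsum : (kids.map (fun c => pvStepsT ch f c)).sum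
          ≤ kids.length * (4 * (L + 2) ^ (f + 1)) := by
        calc (kids.map (fun c => pvStepsT ch f c)).sum
            ≤ (kids.map (fun c => pvStepsT ch f c)).length * (4 * (L + 2) ^ (f + 1)) := by
              apply List.sum_le_card_nsmul
              intro x hx
              obtain ⟨c, _, rfl⟩ := List.mem_map.mp hx
              exact ih c
          _ = kids.length * (4 * (L + 2) ^ (f + 1)) := by rw [List.length_map]
      have hpad : (if kids.length == 1 then 2 else 0) ≤ 2 := by split_ifs <;> omega
      have hmul : kids.length * (4 * (L + 2) ^ (f + 1)) ≤ L * (4 * (L + 2) ^ (f + 1)) :=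
        Nat.mul_le_mul_right _ hk
      have hgoal : 3 + L * (4 * (L + 2) ^ (f + 1)) + L + 2 + 2 ≤ 4 * ((L + 2) ^ (f + 1) * (L + 2)) := by
        have : 4 * ((L + 2) ^ (f + 1) * (L + 2)) = L * (4 * (L + 2) ^ (f + 1)) + 8 * (L + 2) ^ (f + 1) := by ring
        omega
      omega

-- ---- joining the token stream gives A's string ----
lemma pvCharsJoinNilAppend (as bs : List (List Char)) :
    PySem.Chars.join [] (as ++ bs) = PySem.Chars.join [] as ++ PySem.Chars.join [] bs := by
  induction as with
  | nil => simp [PySem.Chars.join_nil]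
  | cons a as ih =>
    cases as with
    | nil =>
      cases bs with
      | nil => simp [PySem.Chars.join_nil, PySem.Chars.join_singleton]
      | cons b bs => simp [PySem.Chars.join_singleton, PySem.Chars.join_cons_cons]
    | cons a' as' =>
      simp only [List.cons_append, PySem.Chars.join_cons_cons] at ih ⊢
      rw [ih]; simp

lemma pvStrJoinNilAppend (a b : List String) :
    PySem.Str.join "" (a ++ b) = PySem.Str.join "" a ++ PySem.Str.join "" b := by
  apply String.toList_inj.mp
  simp [PySem.Str.toList_join, pvCharsJoinNilAppend]

lemma pvStrJoinSingle (sep s : String) : PySem.Str.join sep [s] = s := by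
  apply String.toList_inj.mp
  simp [PySem.Str.toList_join, PySem.Chars.join_singleton]

lemma pvStrJoinCommaCons (p q : String) (rest : List String) :
    PySem.Str.join "," (p :: q :: rest) = p ++ "," ++ PySem.Str.join "," (q :: rest) := by
  apply String.toList_inj.mp
  simp [PySem.Str.toList_join, PySem.Chars.join_cons_cons]

lemma pvJoinSep :
    ∀ (tss : List (List String)),
      PySem.Str.join "" (pvSepJoin tss) = PySem.Str.join "," (tss.map (PySem.Str.join "")) := by
  intro tss
  induction tss with
  | nil =>
    apply String.toList_inj.mp
    simp [pvSepJoin, PySem.Str.toList_join, PySem.Chars.join_nil]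
  | cons ts tss ih =>
    cases tss with
    | nil => simp [pvSepJoin, List.map, pvStrJoinSingle]
    | cons ts' rest =>
      rw [pvSepJoin, show ts ++ [","] ++ pvSepJoin (ts' :: rest)
            = ts ++ ([","] ++ pvSepJoin (ts' :: rest)) from by simp,
          pvStrJoinNilAppend, pvStrJoinNilAppend, ih, pvStrJoinSingle,
          List.map_cons]
      simp only [List.map_cons]
      rw [pvStrJoinCommaCons]
      simp [String.append_assoc]

lemma pvJoinTok (ch : PySem.Dict String (List String)) :
    ∀ f n, PySem.Str.join "" (pvTokT ch f n) = pvRecCvt ch f n := by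
  intro f
  induction f with
  | zero => intro n; simp [pvTokT, pvRecCvt, pvStrJoinSingle]
  | succ f ih =>
    intro n
    cases hg : ch.get? n with
    | none => simp [pvTokT, pvRecCvt, hg, pvStrJoinSingle]
    | some kids =>
      rw [pvTokT, pvRecCvt]
      simp only [hg]
      by_cases hlen : kids.length = 1
      · obtain ⟨c, rfl⟩ := List.length_eq_one_iff.mp hlen
        simp only [List.map_cons, List.map_nil, pvSepJoin, List.length_cons,
          List.length_nil, beq_self_eq_true, if_true, Nat.zero_add]
        rw [show ["("] ++ (pvTokT ch f c ++ [",", "_"]) ++ [")" ++ n]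
              = ["("] ++ (pvTokT ch f c ++ (["," ] ++ (["_"] ++ [")" ++ n]))) from by simp,
            pvStrJoinNilAppend, pvStrJoinNilAppend, pvStrJoinNilAppend, pvStrJoinNilAppend,
            pvStrJoinSingle, pvStrJoinSingle, pvStrJoinSingle, pvStrJoinSingle, ih c,
            List.singleton_append, pvStrJoinCommaCons, pvStrJoinSingle]
        simp only [String.append_assoc]
      · have hbe : (kids.length == 1) = false := by simpa using hlen
        have hbe2 : ((kids.map (fun c => pvRecCvt ch f c)).length == 1) = false := by
          simpa using hlen
        simp only [List.length_map, hbe, if_false, Bool.false_eq_true]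
        rw [show ["("] ++ pvSepJoin (kids.map (fun c => pvTokT ch f c)) ++ [")" ++ n]
              = ["("] ++ (pvSepJoin (kids.map (fun c => pvTokT ch f c)) ++ [")" ++ n]) from by simp,
            pvStrJoinNilAppend, pvStrJoinNilAppend, pvStrJoinSingle, pvStrJoinSingle, pvJoinSep]
        rw [List.map_map]
        have : (fun c => PySem.Str.join "" (pvTokT ch f c)) = (fun c => pvRecCvt ch f c) := by
          funext c; exact ih c
        rw [show ((PySem.Str.join "") ∘ (fun c => pvTokT ch f c)) = fun c => pvRecCvt ch f c from by
          funext c; exact ih c]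
        simp [String.append_assoc]

-- ===== VERDICT (by name: the statement is the Claim_ definition above) =====
theorem cvtNewick_spec : Claim_equal_cvtNewick := by
  intro parent _ hpre
  unfold Spec_cvtNewick cvtNewick cvtNewick_alt
  show ((pvChildren parent).items, pvRecCvt (pvChildren parent) (parent.length + 2) "Root" ++ ";")
      = ((pvChildren parent).items,
        PySem.Str.join "" (pvAltLoop (pvChildren parent) (pvFuel parent) [("Root", true)] []) ++ ";")
  have hok : pvOkT (pvChildren parent) (parent.length + 2) "Root" = true := by
    apply pvMainTerm hpre (parent.length + 2) 0 "Root" (by simp [pvAnc])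
    have := pvOfList_size_le parent
    omega
  have hbound : pvStepsT (pvChildren parent) (parent.length + 2) "Root" ≤ pvFuel parent := by
    have := pvStepsBound (pvChildren parent) parent.length
      (fun n kids h => pvChildren_kids_len h) (parent.length + 2) "Root"
    simpa [pvFuel, show parent.length + 2 + 1 = parent.length + 3 from by omega] using this
  obtain ⟨g, hgeq⟩ : ∃ g, pvFuel parent
      = pvStepsT (pvChildren parent) (parent.length + 2) "Root" + g :=
    ⟨pvFuel parent - pvStepsT (pvChildren parent) (parent.length + 2) "Root", by omega⟩
  rw [hgeq, pvSim (pvChildren parent) (parent.length + 2) "Root" hok [] [] g, pvAltLoop_nil]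
  rw [List.nil_append, pvJoinTok]
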